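-- pv_equiv track=rewrite | github.com/YarLys/ASM_n_Interpretator | interpretator.py | get_high_bits
-- ===== SOURCE A (Python) =====
-- def get_high_bits(command, n):  # Функция для получения n младших битов
--     total_bits = 32
--     remaining_bits = total_bits - n
--     result = 0
--     for i in range(remaining_bits):
--         byte_index = (n + i) // 8
--         bit_index = (n + i) % 8
--         if byte_index < len(command):
--             bit = (command[byte_index] >> bit_index) & 1
--             result |= (bit << i)
--
--     return result
-- ===== SOURCE B (Python) =====
-- def get_high_bits(command, n):
--     # Assemble the 32-bit value from the first (up to) four bytes, then
--     # extract bits n..31 with one shift-and-mask.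
--     if n >= 32:
--         return 0
--     value = 0
--     for i in range(min(4, len(command))):
--         value |= (command[i] & 0xFF) << (8 * i)
--     return (value >> n) & ((1 << (32 - n)) - 1)
-- ===== Notes on version B (the rewrite author's own statement) =====
-- stated objective: simpler
-- what changed: Replaced the per-bit loop (one iteration per extracted bit, with per-iteration floor-division and modulo) by assembling the 32-bit value from the first up-to-four bytes once and extracting bits n..31 with a single shift-and-mask.
-- outside the precondition, e.g. on get_high_bits([1], -1): A returns 2, B raises ValueError; on get_high_bits([1], -17): A raises IndexError, B raises ValueError
import Mathlib
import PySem

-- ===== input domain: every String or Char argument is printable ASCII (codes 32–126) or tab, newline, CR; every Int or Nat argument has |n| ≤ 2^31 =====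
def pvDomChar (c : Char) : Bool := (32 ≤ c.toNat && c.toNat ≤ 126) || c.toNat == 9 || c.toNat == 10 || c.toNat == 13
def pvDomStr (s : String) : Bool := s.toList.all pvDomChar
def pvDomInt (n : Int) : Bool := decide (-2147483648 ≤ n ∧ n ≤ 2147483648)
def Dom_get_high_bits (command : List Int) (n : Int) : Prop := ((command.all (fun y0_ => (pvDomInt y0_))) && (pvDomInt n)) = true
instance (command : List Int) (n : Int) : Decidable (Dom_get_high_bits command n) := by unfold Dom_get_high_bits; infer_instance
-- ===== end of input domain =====

-- B replaces A's per-bit loop by assembling the value from the first up-to-four bytes once and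
-- extracting bits n..31 with a single shift-and-mask (objective: simpler).

-- ===== PORT A =====
def get_high_bits (command : List Int) (n : Int) : Int :=
  let total_bits : Int := 32
  let remaining_bits := total_bits - n
  (PySem.List.pyRange 0 remaining_bits 1).foldl (fun result i =>
    let byte_index := PySem.Int.floordiv (n + i) 8
    let bit_index := PySem.Int.mod (n + i) 8
    if byte_index < (command.length : Int) then
      -- command[byte_index]: in range whenever Python returns (checked < len, and ≥ 0 under Pre_)
      let bit := PySem.Int.band (((PySem.List.pyGet? command byte_index).getD 0) >>> bit_index.toNat) 1
      PySem.Int.bor result (bit <<< i.toNat)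
    else result) 0

-- ===== PORT B =====
def get_high_bits_alt (command : List Int) (n : Int) : Int :=
  if 32 ≤ n then 0
  else
    let value := (PySem.List.pyRange 0 (min 4 (command.length : Int)) 1).foldl
      (fun v i => PySem.Int.bor v ((PySem.Int.band ((PySem.List.pyGet? command i).getD 0) 255) <<< (8 * i).toNat)) 0
    -- value >> n and (1 << (32-n)) - 1: n ≥ 0 under Pre_ (Python raises ValueError on a negative shift)
    PySem.Int.band (value >>> n.toNat) ((1 <<< ((32 : Int) - n).toNat) - 1)

-- ===== PRECONDITION & SPEC =====
-- Pre_ excludes negative n: there B's own right-shift `value >> n` raises ValueError (so exclusion,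
-- not D_, is the right form), while A either raises IndexError (n sufficiently negative) or returns
-- a value read through Python's negative-index wraparound.
def Pre_get_high_bits (command : List Int) (n : Int) : Prop := 0 ≤ n
instance (command : List Int) (n : Int) : Decidable (Pre_get_high_bits command n) := by unfold Pre_get_high_bits; infer_instance
def pvWitness_get_high_bits : List Int × Int := ([1, 2, 3, 4], 7)

def Spec_get_high_bits (command : List Int) (n : Int) (out : Int) : Prop := out = get_high_bits_alt command n
instance (command : List Int) (n : Int) (out : Int) : Decidable (Spec_get_high_bits command n out) := by unfold Spec_get_high_bits; infer_instance

-- ===== CLAIM (what is proved, stated in full; the proofs are below) =====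
def Claim_equal_get_high_bits : Prop := ∀ (command : List Int) (n : Int), Dom_get_high_bits command n → Pre_get_high_bits command n → Spec_get_high_bits command n (get_high_bits command n)

-- ===== LEMMAS AND PROOFS =====

-- byte b of the 32-bit value both programs read (0 for bytes past the end of the list)
def pvByte (c : List Int) (b : Nat) : Int := if b < c.length then (c.getD b 0) % 256 else 0
def pvY (c : List Int) : Int := pvByte c 0 + 256 * pvByte c 1 + 65536 * pvByte c 2 + 16777216 * pvByte c 3
def pvBit (c : List Int) (k : Nat) : Int := pvY c / 2 ^ k % 2
def pvS (c : List Int) (nn r : Nat) : Int := ((List.range r).map (fun j => pvBit c (nn + j) * 2 ^ j)).sum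

theorem pvByte_bounds (c : List Int) (b : Nat) : 0 ≤ pvByte c b ∧ pvByte c b < 256 := by
  unfold pvByte; split_ifs <;> omega

theorem pvY_nonneg (c : List Int) : 0 ≤ pvY c := by
  have h0 := pvByte_bounds c 0; have h1 := pvByte_bounds c 1
  have h2 := pvByte_bounds c 2; have h3 := pvByte_bounds c 3
  unfold pvY; omega

-- disjoint bitwise or is addition
theorem pv_or_disjoint (a b : Int) (k : Nat) (ha : 0 ≤ a) (hak : a < 2 ^ k) (hb : 0 ≤ b) :
    PySem.Int.bor a (b <<< k) = a + b * 2 ^ k := by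
  lift a to Nat using ha with m
  lift b to Nat using hb with p
  have hm : m < 2 ^ k := by exact_mod_cast hak
  rw [show ((p : Int) <<< k) = ((p <<< k : Nat) : Int) by
        simp only [Int.shiftLeft_eq, Nat.shiftLeft_eq]; push_cast; ring,
      PySem.Int.bor_natCast]
  have : m ||| p <<< k = m + p * 2 ^ k := by
    rw [Nat.shiftLeft_eq, Nat.lor_comm, Nat.mul_comm p, ← Nat.two_pow_add_eq_or_of_lt hm p]
    ring
  rw [this]; push_cast; ring

-- x & 255 = x % 256 for every Int (Python two's-complement &)
theorem pv_band255 (x : Int) : PySem.Int.band x 255 = x % 256 := by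
  unfold PySem.Int.band
  by_cases hx : 0 ≤ x
  · simp only [hx, if_true, show (0:Int) ≤ 255 by norm_num]
    rw [show ((255 : Int).toNat) = 2 ^ 8 - 1 from rfl, Nat.and_two_pow_sub_one_eq_mod]
    omega
  · simp only [hx, if_false, show (0:Int) ≤ 255 by norm_num, if_true]
    rw [Nat.and_comm, show ((255 : Int).toNat) = 2 ^ 8 - 1 from rfl, Nat.and_two_pow_sub_one_eq_mod]
    omega

-- mask with 2^k - 1 is mod 2^k (nonnegative value)
theorem pv_band_mask (v : Int) (k : Nat) (hv : 0 ≤ v) : PySem.Int.band v (2 ^ k - 1) = v % 2 ^ k := by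
  lift v to Nat using hv with m
  have h1 : ((2 : Int) ^ k - 1) = ((2 ^ k - 1 : Nat) : Int) := by
    have := Nat.one_le_two_pow (n := k); push_cast [Nat.cast_sub this]; ring
  rw [h1, PySem.Int.band_natCast, Nat.and_two_pow_sub_one_eq_mod]
  push_cast; rfl

-- A's single-bit read equals a bit of the low byte
theorem pv_bit_extract (x : Int) (t : Nat) (ht : t < 8) :
    PySem.Int.band (x >>> t) 1 = (x % 256) / 2 ^ t % 2 := by
  rw [PySem.Int.band_one, PySem.Int.mod_eq_emod_of_pos (by norm_num), Int.shiftRight_eq_div_pow]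
  interval_cases t <;> push_cast <;> omega

-- bit 8*q+t of pvY is bit t of byte q
theorem pv_bit_of_byte (c : List Int) (q t : Nat) (hq : q < 4) (ht : t < 8) :
    pvY c / 2 ^ (8 * q + t) % 2 = pvByte c q / 2 ^ t % 2 := by
  have h0 := pvByte_bounds c 0; have h1 := pvByte_bounds c 1
  have h2 := pvByte_bounds c 2; have h3 := pvByte_bounds c 3
  have key : ∀ (y h : Int), 0 ≤ y → y < 256 → 0 ≤ h →
      (y + 256 * h) / 2 ^ t % 2 = y / 2 ^ t % 2 := by
    intro y h hy hy' hh
    interval_cases t <;> omega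
  have hdiv : pvY c / 2 ^ (8 * q + t) = pvY c / 2 ^ (8 * q) / 2 ^ t := by
    rw [pow_add, ← Int.ediv_ediv_of_nonneg (by positivity : (0:Int) ≤ 2 ^ (8 * q))]
  rw [hdiv]
  interval_cases q
  · rw [show pvY c / 2 ^ (8 * 0) = pvByte c 0 + 256 * (pvByte c 1 + 256 * pvByte c 2 + 65536 * pvByte c 3) by
        rw [show ((2:Int) ^ (8 * 0)) = 1 by norm_num]; unfold pvY; omega]
    exact key _ _ h0.1 h0.2 (by omega)
  · rw [show pvY c / 2 ^ (8 * 1) = pvByte c 1 + 256 * (pvByte c 2 + 256 * pvByte c 3) by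
        rw [show ((2:Int) ^ (8 * 1)) = 256 by norm_num]; unfold pvY; omega]
    exact key _ _ h1.1 h1.2 (by omega)
  · rw [show pvY c / 2 ^ (8 * 2) = pvByte c 2 + 256 * pvByte c 3 by
        rw [show ((2:Int) ^ (8 * 2)) = 65536 by norm_num]; unfold pvY; omega]
    exact key _ _ h2.1 h2.2 (by omega)
  · rw [show pvY c / 2 ^ (8 * 3) = pvByte c 3 + 256 * 0 by
        rw [show ((2:Int) ^ (8 * 3)) = 16777216 by norm_num]; unfold pvY; omega]
    exact key _ _ h3.1 h3.2 (by omega)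

-- Σ_{j<r} ((Z/2^j)%2)·2^j = Z % 2^r
theorem pv_bits_sum (Z : Int) (r : Nat) :
    ((List.range r).map (fun j => Z / 2 ^ j % 2 * 2 ^ j)).sum = Z % 2 ^ r := by
  induction r with
  | zero => simp
  | succ r ih =>
    rw [List.range_succ, List.map_append, List.sum_append, ih]
    simp only [List.map_cons, List.map_nil, List.sum_cons, List.sum_nil, add_zero]
    have e1 := Int.mul_ediv_add_emod Z (2 ^ r)
    have e2 := Int.mul_ediv_add_emod (Z / 2 ^ r) 2
    have e3 := Int.mul_ediv_add_emod Z (2 ^ (r + 1))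
    have e4 : Z / 2 ^ (r + 1) = Z / 2 ^ r / 2 := by
      rw [pow_succ, ← Int.ediv_ediv_of_nonneg (by positivity : (0:Int) ≤ 2 ^ r)]
    rw [e4] at e3
    have hp : (2:Int) ^ (r + 1) = 2 ^ r * 2 := by ring
    rw [hp] at e3
    rw [hp]
    linear_combination e1 - e3 + (2 ^ r : Int) * e2

theorem pvS_succ (c : List Int) (nn r : Nat) :
    pvS c nn (r + 1) = pvS c nn r + pvBit c (nn + r) * 2 ^ r := by
  unfold pvS; rw [List.range_succ, List.map_append, List.sum_append]; simp

theorem pvS_bounds (c : List Int) (nn r : Nat) : 0 ≤ pvS c nn r ∧ pvS c nn r < 2 ^ r := by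
  induction r with
  | zero => simp [pvS]
  | succ r ih =>
    have hb : 0 ≤ pvBit c (nn + r) ∧ pvBit c (nn + r) < 2 := by
      unfold pvBit
      exact ⟨Int.emod_nonneg _ (by norm_num), Int.emod_lt_of_pos _ (by norm_num)⟩
    rw [pvS_succ]
    constructor
    · have := mul_nonneg hb.1 (show (0:Int) ≤ 2 ^ r by positivity); omega
    · have h2 : pvBit c (nn + r) * 2 ^ r ≤ 2 ^ r := by
        nlinarith [hb.2, show (0:Int) < 2 ^ r by positivity]
      have : (2:Int) ^ (r + 1) = 2 ^ r * 2 := by ring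
      omega

theorem pv_get_lt (xs : List Int) (q : Nat) (h : q < xs.length) :
    (PySem.List.pyGet? xs (q:Int)).getD 0 = xs.getD q 0 := by
  simp [PySem.List.pyGet?, PySem.List.pyIdx?, h, List.getD]

-- the A-side loop computes pvS
theorem pvA_fold (c : List Int) (nn : Nat) (r : Nat) (h : nn + r ≤ 32) :
    (List.map (fun k : Nat => (k : Int)) (List.range r)).foldl (fun result i =>
      if PySem.Int.floordiv ((nn : Int) + i) 8 < (c.length : Int) then
        PySem.Int.bor result
          (PySem.Int.band (((PySem.List.pyGet? c (PySem.Int.floordiv ((nn : Int) + i) 8)).getD 0) >>>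
              (PySem.Int.mod ((nn : Int) + i) 8).toNat) 1 <<< i.toNat)
      else result) 0 = pvS c nn r := by
  induction r with
  | zero => simp [pvS]
  | succ r ih =>
    rw [List.range_succ]
    simp only [List.map_append, List.map_cons, List.map_nil, List.foldl_append, List.foldl_cons, List.foldl_nil]
    rw [ih (by omega)]
    rw [show ((nn:Int) + (r:Int)) = ((nn + r : Nat) : Int) by push_cast; ring,
        show PySem.Int.floordiv ((nn + r : Nat) : Int) 8 = (((nn + r) / 8 : Nat) : Int) by
          exact_mod_cast PySem.Int.floordiv_natCast (nn + r) 8,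
        show PySem.Int.mod ((nn + r : Nat) : Int) 8 = (((nn + r) % 8 : Nat) : Int) by
          exact_mod_cast PySem.Int.mod_natCast (nn + r) 8]
    have hq4 : (nn + r) / 8 < 4 := by omega
    have ht8 : (nn + r) % 8 < 8 := by omega
    have hqt : 8 * ((nn + r) / 8) + (nn + r) % 8 = nn + r := by omega
    by_cases hlen : (nn + r) / 8 < c.length
    · rw [if_pos (by exact_mod_cast hlen)]
      rw [Int.toNat_natCast, Int.toNat_natCast, pv_get_lt c _ hlen,
          pv_bit_extract _ _ ht8]
      have hbyte : c.getD ((nn + r) / 8) 0 % 256 = pvByte c ((nn + r) / 8) := by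
        rw [pvByte, if_pos hlen]
      rw [hbyte, ← pv_bit_of_byte c _ _ hq4 ht8, hqt]
      have hb := pvS_bounds c nn r
      have hbit : (0:Int) ≤ pvY c / 2 ^ (nn + r) % 2 := Int.emod_nonneg _ (by norm_num)
      rw [pv_or_disjoint _ _ _ hb.1 hb.2 hbit, pvS_succ]
      rfl
    · rw [if_neg (by exact_mod_cast hlen)]
      have : pvBit c (nn + r) = 0 := by
        unfold pvBit
        rw [← hqt, pv_bit_of_byte c _ _ hq4 ht8, pvByte, if_neg hlen]
        norm_num
      rw [pvS_succ, this]
      ring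

-- A as shift-free arithmetic
theorem pvA_char (c : List Int) (nn : Nat) (h : nn < 32) :
    get_high_bits c (nn : Int) = pvS c nn (32 - nn) := by
  simp only [get_high_bits]
  rw [show (32 : Int) - (nn : Int) = ((32 - nn : Nat) : Int) by omega,
      PySem.List.pyRange_zero_natCast]
  exact pvA_fold c nn (32 - nn) (by omega)

-- pv_step: one byte is or-ed into the assembled value
theorem pv_step (v x : Int) (k : Nat) (hv : 0 ≤ v) (hvk : v < 2 ^ k) :
    PySem.Int.bor v (PySem.Int.band x 255 <<< k) = v + x % 256 * 2 ^ k := by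
  rw [pv_band255]; exact pv_or_disjoint _ _ _ hv hvk (by omega)

-- B's value loop assembles pvY
theorem pvB_value (c : List Int) :
    (PySem.List.pyRange 0 (min 4 (c.length : Int)) 1).foldl
      (fun v i => PySem.Int.bor v ((PySem.Int.band ((PySem.List.pyGet? c i).getD 0) 255) <<< (8 * i).toNat)) 0 = pvY c := by
  match c with
  | [] =>
    simp [pvY, pvByte, PySem.List.pyRange]
  | [a] =>
    rw [show min (4:Int) (([a] : List Int).length : Int) = 1 by simp,
        show PySem.List.pyRange 0 1 1 = [0] from by decide]
    simp only [List.foldl_cons, List.foldl_nil]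
    rw [show ((8 * (0:Int)).toNat) = 0 from rfl,
        show (PySem.List.pyGet? [a] 0).getD 0 = a by simp [PySem.List.pyGet?, PySem.List.pyIdx?],
        pv_step 0 a 0 le_rfl (by norm_num)]
    simp [pvY, pvByte]
  | [a, b] =>
    rw [show min (4:Int) (([a, b] : List Int).length : Int) = 2 by simp,
        show PySem.List.pyRange 0 2 1 = [0, 1] from by decide]
    simp only [List.foldl_cons, List.foldl_nil]
    rw [show ((8 * (0:Int)).toNat) = 0 from rfl, show ((8 * (1:Int)).toNat) = 8 from rfl,
        show (PySem.List.pyGet? [a, b] 0).getD 0 = a by simp [PySem.List.pyGet?, PySem.List.pyIdx?],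
        show (PySem.List.pyGet? [a, b] 1).getD 0 = b by simp [PySem.List.pyGet?, PySem.List.pyIdx?],
        pv_step 0 a 0 le_rfl (by norm_num),
        pv_step _ b 8 (by omega) (by norm_num; omega)]
    simp [pvY, pvByte]
    omega
  | [a, b, d] =>
    rw [show min (4:Int) (([a, b, d] : List Int).length : Int) = 3 by simp,
        show PySem.List.pyRange 0 3 1 = [0, 1, 2] from by decide]
    simp only [List.foldl_cons, List.foldl_nil]
    rw [show ((8 * (0:Int)).toNat) = 0 from rfl, show ((8 * (1:Int)).toNat) = 8 from rfl,
        show ((8 * (2:Int)).toNat) = 16 from rfl,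
        show (PySem.List.pyGet? [a, b, d] 0).getD 0 = a by simp [PySem.List.pyGet?, PySem.List.pyIdx?],
        show (PySem.List.pyGet? [a, b, d] 1).getD 0 = b by simp [PySem.List.pyGet?, PySem.List.pyIdx?],
        show (PySem.List.pyGet? [a, b, d] 2).getD 0 = d by simp [PySem.List.pyGet?, PySem.List.pyIdx?],
        pv_step 0 a 0 le_rfl (by norm_num),
        pv_step _ b 8 (by omega) (by norm_num; omega),
        pv_step _ d 16 (by omega) (by norm_num; omega)]
    simp [pvY, pvByte]
    omega
  | a :: b :: d :: e :: rest =>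
    rw [show min (4:Int) (((a :: b :: d :: e :: rest) : List Int).length : Int) = 4 by
          simp; omega,
        show PySem.List.pyRange 0 4 1 = [0, 1, 2, 3] from by decide]
    simp only [List.foldl_cons, List.foldl_nil]
    rw [show ((8 * (0:Int)).toNat) = 0 from rfl, show ((8 * (1:Int)).toNat) = 8 from rfl,
        show ((8 * (2:Int)).toNat) = 16 from rfl, show ((8 * (3:Int)).toNat) = 24 from rfl,
        show (PySem.List.pyGet? (a :: b :: d :: e :: rest) 0).getD 0 = a by
          simp [PySem.List.pyGet?, PySem.List.pyIdx?, show (0:Int) ≤ (rest.length:Int) + 1 + 1 + 1 by omega],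
        show (PySem.List.pyGet? (a :: b :: d :: e :: rest) 1).getD 0 = b by
          simp [PySem.List.pyGet?, PySem.List.pyIdx?, show (0:Int) ≤ (rest.length:Int) + 1 + 1 by omega],
        show (PySem.List.pyGet? (a :: b :: d :: e :: rest) 2).getD 0 = d by
          simp [PySem.List.pyGet?, PySem.List.pyIdx?, show (2:Int) ≤ (rest.length:Int) + 1 + 1 + 1 by omega],
        show (PySem.List.pyGet? (a :: b :: d :: e :: rest) 3).getD 0 = e by
          simp [PySem.List.pyGet?, PySem.List.pyIdx?, show (3:Int) ≤ (rest.length:Int) + 1 + 1 + 1 by omega],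
        pv_step 0 a 0 le_rfl (by norm_num),
        pv_step _ b 8 (by omega) (by norm_num; omega),
        pv_step _ d 16 (by omega) (by norm_num; omega),
        pv_step _ e 24 (by omega) (by norm_num; omega)]
    simp [pvY, pvByte]
    omega

-- B as shift-free arithmetic
theorem pvB_char (c : List Int) (nn : Nat) (h : nn < 32) :
    get_high_bits_alt c (nn : Int) = pvY c / 2 ^ nn % 2 ^ (32 - nn) := by
  simp only [get_high_bits_alt]
  rw [if_neg (by omega : ¬ (32:Int) ≤ (nn : Int))]
  rw [pvB_value, Int.toNat_natCast,
      show (((32:Int) - (nn : Int)).toNat) = 32 - nn by omega]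
  have hZ : (0:Int) ≤ pvY c / ((2 ^ nn : Nat) : Int) :=
    Int.ediv_nonneg (pvY_nonneg c) (by positivity)
  rw [show (((1 <<< (32 - nn) : Nat)) : Int) - 1 = 2 ^ (32 - nn) - 1 by
        rw [Nat.shiftLeft_eq]; push_cast; ring,
      Int.shiftRight_eq_div_pow, pv_band_mask _ _ hZ]
  push_cast
  rfl

-- ===== VERDICT (by name: the statement is the Claim_ definition above) =====
theorem get_high_bits_spec : Claim_equal_get_high_bits := by
  intro command n _ hPre
  unfold Spec_get_high_bits
  by_cases hn : 32 ≤ n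
  · have hA : get_high_bits command n = 0 := by
      have he : PySem.List.pyRange 0 (32 - n) 1 = [] := by
        unfold PySem.List.pyRange
        simp only [one_ne_zero, if_false, if_neg (by omega : ¬ (0:Int) < 32 - n)]
        simp
      unfold get_high_bits
      simp only [he, List.foldl_nil]
    have hB : get_high_bits_alt command n = 0 := by
      unfold get_high_bits_alt; rw [if_pos hn]
    rw [hA, hB]
  · have hPre' : (0:Int) ≤ n := hPre
    obtain ⟨nn, rfl⟩ := Int.eq_ofNat_of_zero_le hPre'
    have hnn : nn < 32 := by omega
    rw [pvA_char command nn hnn, pvB_char command nn hnn,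
        ← pv_bits_sum (pvY command / 2 ^ nn) (32 - nn)]
    unfold pvS pvBit
    refine congrArg List.sum (List.map_congr_left ?_)
    intro j _
    rw [pow_add, ← Int.ediv_ediv_of_nonneg (by positivity : (0:Int) ≤ 2 ^ nn)]
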